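-- pv_equiv track=rewrite | github.com/Glottocrisio/HILDEGARD | sdowmock.py | triples_triples
-- ===== SOURCE A (Python) =====
-- def triples_triples(triples):
--
--   grouped_triples = []
--   i = 0
--   while i <= len(triples) - 3:
--     triple_group = (triples[i], triples[i + 1], triples[i + 2])
--     grouped_triples.append(triple_group)
--     i = i + 1
--   return grouped_triples
-- ===== SOURCE B (Python) =====
-- def triples_triples(triples):
--     out = []
--     window = []
--     for x in triples:
--         window.append(x)
--         if len(window) == 3:
--             out.append(tuple(window))
--             window.pop(0)
--     return out
-- ===== Notes on version B (the rewrite author's own statement) =====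
-- stated objective: alternative
-- what changed: Replaced the index-based while loop reading triples[i..i+2] by a single streaming pass that maintains a rolling 3-element window buffer, emitting a tuple whenever the window fills and sliding it forward; no indexing or slicing at all.
import Mathlib
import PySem

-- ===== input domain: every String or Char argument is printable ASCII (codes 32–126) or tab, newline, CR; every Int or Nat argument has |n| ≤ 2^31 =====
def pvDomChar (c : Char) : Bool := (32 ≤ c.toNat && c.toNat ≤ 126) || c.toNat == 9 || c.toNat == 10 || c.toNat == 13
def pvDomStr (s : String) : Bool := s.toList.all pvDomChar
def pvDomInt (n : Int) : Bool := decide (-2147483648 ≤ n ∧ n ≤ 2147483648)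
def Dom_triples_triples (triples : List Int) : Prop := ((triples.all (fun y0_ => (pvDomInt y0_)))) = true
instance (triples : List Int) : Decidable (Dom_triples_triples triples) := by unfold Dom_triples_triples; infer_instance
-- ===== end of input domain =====

-- B replaces A's index-based while loop by a single streaming pass maintaining a rolling
-- 3-element window buffer; same linear cost, no indexing.

-- ===== PORT A =====
-- while i <= len(triples) - 3: append (triples[i], triples[i+1], triples[i+2]); i += 1
def triplesLoopA (xs : List Int) (i : Nat) (acc : List (Int × Int × Int)) :
    List (Int × Int × Int) :=
  if h : i + 3 ≤ xs.length then
    triplesLoopA xs (i + 1)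
      (acc ++ [(xs[i]'(by omega), xs[i+1]'(by omega), xs[i+2]'(by omega))])
  else acc
termination_by xs.length - i

def triples_triples (triples : List Int) : List (Int × Int × Int) :=
  triplesLoopA triples 0 []

-- ===== PORT B =====
-- for x in triples: window.append(x); if len(window)==3: out.append(tuple(window)); window.pop(0)
def triplesStepB (st : List Int × List (Int × Int × Int)) (x : Int) :
    List Int × List (Int × Int × Int) :=
  let w := st.1 ++ [x]
  if h : w.length = 3 then
    (w.drop 1, st.2 ++ [(w[0]'(by omega), w[1]'(by omega), w[2]'(by omega))])
  else (w, st.2)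

def triples_triples_alt (triples : List Int) : List (Int × Int × Int) :=
  (triples.foldl triplesStepB ([], [])).2

-- ===== PRECONDITION & SPEC =====
def Spec_triples_triples (triples : List Int) (out : List (Int × Int × Int)) : Prop := out = triples_triples_alt triples
instance (triples : List Int) (out : List (Int × Int × Int)) : Decidable (Spec_triples_triples triples out) := by unfold Spec_triples_triples; infer_instance

-- ===== CLAIM (what is proved, stated in full; the proofs are below) =====
def Claim_equal_triples_triples : Prop := ∀ (triples : List Int), Dom_triples_triples triples → Spec_triples_triples triples (triples_triples triples)

-- ===== LEMMAS AND PROOFS =====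
-- reference spec: consecutive triples by structural recursion
def tripSpec : List Int → List (Int × Int × Int)
  | a :: b :: c :: t => (a, b, c) :: tripSpec (b :: c :: t)
  | _ => []

lemma tripSpec_short (xs : List Int) (h : xs.length < 3) : tripSpec xs = [] := by
  match xs, h with
  | [], _ => rfl
  | [a], _ => rfl
  | [a, b], _ => rfl

lemma drop_cons3 (xs : List Int) (i : Nat) (h : i + 3 ≤ xs.length) :
    xs.drop i = xs[i]'(by omega) :: xs[i+1]'(by omega) :: xs[i+2]'(by omega) :: xs.drop (i+3) := by
  rw [List.drop_eq_getElem_cons (by omega), List.drop_eq_getElem_cons (i := i+1) (by omega),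
      List.drop_eq_getElem_cons (i := i+2) (by omega)]

lemma loopA_eq (xs : List Int) (i : Nat) (acc : List (Int × Int × Int)) :
    triplesLoopA xs i acc = acc ++ tripSpec (xs.drop i) := by
  rw [triplesLoopA]
  split
  · next h =>
    rw [loopA_eq xs (i+1) _]
    have hd := drop_cons3 xs i h
    have hd' : xs.drop (i+1) = xs[i+1]'(by omega) :: xs[i+2]'(by omega) :: xs.drop (i+3) := by
      rw [List.drop_eq_getElem_cons (i := i+1) (by omega),
          List.drop_eq_getElem_cons (i := i+2) (by omega)]
    rw [hd, hd', tripSpec]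
    simp
  · next h =>
    rw [tripSpec_short _ (by have := List.length_drop (l := xs) (i := i); omega)]
    simp
termination_by xs.length - i

lemma foldB_eq (ys w : List Int) (acc : List (Int × Int × Int)) (hw : w.length ≤ 2) :
    (ys.foldl triplesStepB (w, acc)).2 = acc ++ tripSpec (w ++ ys) := by
  induction ys generalizing w acc with
  | nil => simp [tripSpec_short w (by omega)]
  | cons x t ih =>
    match w, hw with
    | [], _ =>
      rw [List.foldl_cons]
      show (t.foldl triplesStepB (triplesStepB ([], acc) x)).2 = _
      rw [show triplesStepB ([], acc) x = ([x], acc) from rfl, ih [x] acc (by simp)]; rfl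
    | [a], _ =>
      rw [List.foldl_cons]
      show (t.foldl triplesStepB (triplesStepB ([a], acc) x)).2 = _
      rw [show triplesStepB ([a], acc) x = ([a, x], acc) from rfl, ih [a, x] acc (by simp)]; rfl
    | [a, b], _ =>
      rw [List.foldl_cons]
      show (t.foldl triplesStepB (triplesStepB ([a, b], acc) x)).2 = _
      rw [show triplesStepB ([a, b], acc) x = ([b, x], acc ++ [(a, b, x)]) from rfl,
          ih [b, x] _ (by simp)]
      simp [tripSpec]

-- ===== VERDICT (by name: the statement is the Claim_ definition above) =====
theorem triples_triples_spec : Claim_equal_triples_triples := by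
  intro xs _
  show triplesLoopA xs 0 [] = triples_triples_alt xs
  rw [loopA_eq, triples_triples_alt, foldB_eq xs [] [] (by simp)]
  simp
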